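-- pv_equiv track=rewrite | github.com/AruJoy/algorithm-study | 백준/Gold/14890. 경사로/경사로.py | put_runway
-- ===== SOURCE A (Python) =====
-- def able_putting_runway(runway_road, direction, height, current_space, way, map_size, runway_length):
--     if (direction):
--         if current_space + runway_length > map_size - 1:
--             return False
--         for i in range(runway_length):
--             if way[current_space + i + 1] == height-1 and not runway_road[current_space + i + 1]:
--                 runway_road[current_space + i + 1] = True
--                 continue
--             return False
--     if (not direction):
--         if current_space - runway_length + 1 < 0:
--             return False
--         for i in range(runway_length):
--             if way[current_space - i] == height and not runway_road[current_space - i]: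
--                 runway_road[current_space - i] = True
--                 continue
--             return False
--     return True
--
-- def put_runway(way, map_size, runway_length):
--     runway_road = [False for _ in range(map_size)]
--     for i in range(map_size-1):
--         if way[i] == way[i+1]:
--             continue
--         if way[i]+1 == way[i+1]:
--             if(able_putting_runway(runway_road, False, way[i], i, way, map_size, runway_length)):
--                 continue
--             return False
--         if way[i]-1 == way[i+1]:
--             if(able_putting_runway(runway_road, True, way[i], i, way, map_size, runway_length)):
--                 i+=runway_length
--                 continue
--             return False
--         return False
--     return True
-- ===== SOURCE B (Python) =====
-- def put_runway(way, map_size, runway_length):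
--     L = runway_length
--     run = 1  # usable length of the current equal-height run (ramp cells already consumed)
--     for i in range(map_size - 1):
--         a, b = way[i], way[i + 1]
--         if a == b:
--             run += 1
--         elif b == a + 1:          # step up: need L free cells ending here
--             if run < L:
--                 return False
--             run = 1
--         elif b == a - 1:          # step down: next run starts with L cells consumed
--             if run < 0:
--                 return False
--             run = 1 - L
--         else:
--             return False
--     return run >= 0
-- ===== Notes on version B (the rewrite author's own statement) =====
-- stated objective: alternative
-- what changed: B replaces A's mutable runway_road marking array and the per-height-step ramp-placement rescan by a single linear pass that keeps one integer, the usable length of the current equal-height run (a descent pre-consumes runway_length cells as a debt).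
-- outside the precondition, e.g. on put_runway([1, 0, 0], 5, 7): A returns False, B raises IndexError; on put_runway([0, 1, 5], 5, 1): A returns False, B returns False
import Mathlib
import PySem

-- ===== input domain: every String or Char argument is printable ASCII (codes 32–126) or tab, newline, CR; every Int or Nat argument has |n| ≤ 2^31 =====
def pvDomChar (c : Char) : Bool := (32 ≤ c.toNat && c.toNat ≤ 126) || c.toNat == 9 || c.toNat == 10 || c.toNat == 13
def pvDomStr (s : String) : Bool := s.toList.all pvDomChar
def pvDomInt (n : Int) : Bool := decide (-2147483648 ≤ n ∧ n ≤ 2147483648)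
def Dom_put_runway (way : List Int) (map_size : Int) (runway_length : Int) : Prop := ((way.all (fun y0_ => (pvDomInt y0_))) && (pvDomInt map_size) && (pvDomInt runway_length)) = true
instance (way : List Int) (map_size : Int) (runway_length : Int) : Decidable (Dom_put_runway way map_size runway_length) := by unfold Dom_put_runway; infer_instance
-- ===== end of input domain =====

-- B replaces A's mutable marking array and per-step ramp-placement rescans by a single
-- linear pass that tracks one integer, the usable length of the current equal-height run
-- (objective: alternative; a timing run measured B at 1.41x of A at the largest size,
-- below the 1.5x bar, so no speed claim is made). A mutates no argument; `runway_road` is local.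

-- ===== PORT A =====
-- way[i] / runway_road[i]; `.getD` is exact for indices A actually reaches inside Pre_put_runway
def pvGetI (xs : List Int) (i : Int) : Int := (PySem.List.pyGet? xs i).getD 0
def pvGetB (xs : List Bool) (i : Int) : Bool := (PySem.List.pyGet? xs i).getD false
-- runway_road[i] = True; A's guards keep i nonnegative and in range
def pvSetB (xs : List Bool) (i : Int) (v : Bool) : List Bool := xs.set i.toNat v

-- the `for i in range(runway_length)` loop of the `direction` (downhill) branch
def ableLoopT (rr : List Bool) (way : List Int) (height cs : Int) : Nat → Int → List Bool × Bool
  | 0, _ => (rr, true)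
  | rem+1, j =>
    if pvGetI way (cs + j + 1) = height - 1 ∧ pvGetB rr (cs + j + 1) = false then
      ableLoopT (pvSetB rr (cs + j + 1) true) way height cs rem (j+1)
    else (rr, false)

-- the `for i in range(runway_length)` loop of the `not direction` (uphill) branch
def ableLoopF (rr : List Bool) (way : List Int) (height cs : Int) : Nat → Int → List Bool × Bool
  | 0, _ => (rr, true)
  | rem+1, j =>
    if pvGetI way (cs - j) = height ∧ pvGetB rr (cs - j) = false then
      ableLoopF (pvSetB rr (cs - j) true) way height cs rem (j+1)
    else (rr, false)

-- returns the (mutated) runway_road together with the boolean result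
def able_putting_runway (rr : List Bool) (direction : Bool) (height cs : Int)
    (way : List Int) (ms L : Int) : List Bool × Bool :=
  if direction then
    if cs + L > ms - 1 then (rr, false)
    else ableLoopT rr way height cs L.toNat 0
  else
    if cs - L + 1 < 0 then (rr, false)
    else ableLoopF rr way height cs L.toNat 0

-- the `for i in range(map_size-1)` loop of put_runway (the `i+=runway_length` of A is a no-op
-- in a Python for loop and so has no counterpart)
def putLoop (way : List Int) (ms L : Int) (rr : List Bool) : Nat → Int → Bool
  | 0, _ => true
  | rem+1, i =>
    if pvGetI way i = pvGetI way (i+1) then putLoop way ms L rr rem (i+1)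
    else if pvGetI way i + 1 = pvGetI way (i+1) then
      if (able_putting_runway rr false (pvGetI way i) i way ms L).2 then
        putLoop way ms L (able_putting_runway rr false (pvGetI way i) i way ms L).1 rem (i+1)
      else false
    else if pvGetI way i - 1 = pvGetI way (i+1) then
      if (able_putting_runway rr true (pvGetI way i) i way ms L).2 then
        putLoop way ms L (able_putting_runway rr true (pvGetI way i) i way ms L).1 rem (i+1)
      else false
    else false

def put_runway (way : List Int) (map_size : Int) (runway_length : Int) : Bool :=
  putLoop way map_size runway_length (List.replicate map_size.toNat false) (map_size - 1).toNat 0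

-- ===== PORT B =====
-- single pass; `run` = usable length of the current equal-height run
def altLoop (way : List Int) (L : Int) : Nat → Int → Int → Bool
  | 0, _, run => decide (0 ≤ run)
  | rem+1, i, run =>
    if pvGetI way i = pvGetI way (i+1) then altLoop way L rem (i+1) (run + 1)
    else if pvGetI way (i+1) = pvGetI way i + 1 then
      if run < L then false else altLoop way L rem (i+1) 1
    else if pvGetI way (i+1) = pvGetI way i - 1 then
      if run < 0 then false else altLoop way L rem (i+1) (1 - L)
    else false

def put_runway_alt (way : List Int) (map_size : Int) (runway_length : Int) : Bool :=
  altLoop way runway_length (map_size - 1).toNat 0 1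

-- ===== PRECONDITION & SPEC =====
-- Pre_ excludes inputs where map_size exceeds len(way) and the road is not flat up to a first
-- step of height ≥ 2 (on those A, and B at a possibly later index, run past the end of `way`
-- and raise IndexError; on the excluded inputs where A happens to return False before the
-- out-of-range access, B may raise instead).
def Pre_put_runway (way : List Int) (map_size : Int) (runway_length : Int) : Prop :=
  map_size ≤ (way.length : Int) ∨
  ∃ i, i < way.length ∧ (i + 1 < way.length ∧
    (way.getD (i+1) 0 - way.getD i 0 < -1 ∨ 1 < way.getD (i+1) 0 - way.getD i 0) ∧
    ∀ j, j < i → way.getD (j+1) 0 = way.getD j 0)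
instance (way : List Int) (map_size : Int) (runway_length : Int) : Decidable (Pre_put_runway way map_size runway_length) := by unfold Pre_put_runway; infer_instance

def pvWitness_put_runway : List Int × Int × Int := ([1, 1, 2], 3, 1)

def Spec_put_runway (way : List Int) (map_size : Int) (runway_length : Int) (out : Bool) : Prop := out = put_runway_alt way map_size runway_length
instance (way : List Int) (map_size : Int) (runway_length : Int) (out : Bool) : Decidable (Spec_put_runway way map_size runway_length out) := by unfold Spec_put_runway; infer_instance

-- ===== CLAIM (what is proved, stated in full; the proofs are below) =====
def Claim_equal_put_runway : Prop := ∀ (way : List Int) (map_size : Int) (runway_length : Int), Dom_put_runway way map_size runway_length → Pre_put_runway way map_size runway_length → Spec_put_runway way map_size runway_length (put_runway way map_size runway_length)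

-- ===== LEMMAS AND PROOFS =====



lemma pvGetB_eq (rr : List Bool) (t : Int) (h : 0 ≤ t) :
    pvGetB rr t = (rr[t.toNat]?).getD false := by
  simp only [pvGetB]
  rw [PySem.List.pyGet?_of_nonneg (h := h)]

lemma pvGetB_set_self (rr : List Bool) (u : Int) (v : Bool)
    (h0 : 0 ≤ u) (h1 : u < (rr.length : Int)) :
    pvGetB (pvSetB rr u v) u = v := by
  have hlt : u.toNat < rr.length := by omega
  simp [pvGetB_eq _ _ h0, pvSetB, List.getElem?_set_self, hlt]

lemma pvGetB_set_ne (rr : List Bool) (u t : Int) (v : Bool)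
    (h0 : 0 ≤ u) (ht : 0 ≤ t) (hne : t ≠ u) :
    pvGetB (pvSetB rr u v) t = pvGetB rr t := by
  have : u.toNat ≠ t.toNat := by omega
  simp [pvGetB_eq _ _ ht, pvSetB, List.getElem?_set_ne this]

lemma length_pvSetB (rr : List Bool) (u : Int) (v : Bool) :
    (pvSetB rr u v).length = rr.length := by simp [pvSetB]

-- specification of the downhill placement loop (cells cs+o+1 … cs+o+rem)
lemma ableT_spec (way : List Int) (h cs : Int) :
    ∀ (rem : Nat) (o : Int) (rr : List Bool),
      (∀ j : Int, o ≤ j → pvGetB rr (cs + j + 1) = false) →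
      0 ≤ cs + o + 1 → cs + o + rem < (rr.length : Int) →
      ((ableLoopT rr way h cs rem o).2 = true ↔
        (∀ j : Int, o ≤ j → j < o + rem → pvGetI way (cs + j + 1) = h - 1)) ∧
      ((ableLoopT rr way h cs rem o).2 = true →
        (ableLoopT rr way h cs rem o).1.length = rr.length ∧
        ∀ t : Int, 0 ≤ t → pvGetB (ableLoopT rr way h cs rem o).1 t =
          (pvGetB rr t || decide (cs + o + 1 ≤ t ∧ t ≤ cs + o + rem))) := by
  intro rem
  induction rem with
  | zero =>
    intro o rr hun h0 hlen
    constructor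
    · simp [ableLoopT]; intro j hj hj'; omega
    · intro _
      refine ⟨rfl, ?_⟩
      intro t ht
      have : ¬ (cs + o + 1 ≤ t ∧ t ≤ cs + o + (0:Nat)) := by push_cast; omega
      simp [ableLoopT, this]
  | succ rem ih =>
    intro o rr hun h0 hlen
    have hmark : pvGetB rr (cs + o + 1) = false := hun o le_rfl
    by_cases hh : pvGetI way (cs + o + 1) = h - 1
    · have hcond : pvGetI way (cs + o + 1) = h - 1 ∧ pvGetB rr (cs + o + 1) = false := ⟨hh, hmark⟩
      have hstep : ableLoopT rr way h cs (rem+1) o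
          = ableLoopT (pvSetB rr (cs + o + 1) true) way h cs rem (o+1) := by
        simp [ableLoopT, hcond]
      have hlen' : (pvSetB rr (cs + o + 1) true).length = rr.length := length_pvSetB _ _ _
      have hun' : ∀ j : Int, o + 1 ≤ j → pvGetB (pvSetB rr (cs + o + 1) true) (cs + j + 1) = false := by
        intro j hj
        rw [pvGetB_set_ne _ _ _ _ (by omega) (by omega) (by omega)]
        exact hun j (by omega)
      have hlen2 : cs + (o+1) + (rem:Int) < ((pvSetB rr (cs + o + 1) true).length : Int) := by
        rw [hlen']; push_cast at hlen ⊢; omega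
      have ihs := ih (o+1) (pvSetB rr (cs + o + 1) true) hun' (by omega) hlen2
      constructor
      · rw [hstep]
        rw [ihs.1]
        constructor
        · intro hall j hj hj'
          rcases eq_or_lt_of_le hj with rfl | hjo
          · exact hh
          · exact hall j (by omega) (by push_cast at hj' ⊢; omega)
        · intro hall j hj hj'
          exact hall j (by omega) (by push_cast at hj' ⊢; omega)
      · rw [hstep]
        intro hok
        have := ihs.2 hok
        refine ⟨this.1.trans hlen', ?_⟩
        intro t ht
        rw [this.2 t ht]
        have hbnd : cs + o + 1 < (rr.length : Int) := by push_cast at hlen; omega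
        by_cases htu : t = cs + o + 1
        · subst htu
          rw [pvGetB_set_self rr (cs + o + 1) true (by omega) hbnd]
          simp only [Bool.true_or]
          symm
          rw [Bool.or_eq_true]
          right
          rw [decide_eq_true_eq]
          push_cast
          omega
        · rw [pvGetB_set_ne rr (cs + o + 1) t true (by omega) ht htu]
          congr 1
          rw [decide_eq_decide]
          push_cast
          omega
    · have hcond : ¬ (pvGetI way (cs + o + 1) = h - 1 ∧ pvGetB rr (cs + o + 1) = false) := by
        intro hc; exact hh hc.1
      have hstep : ableLoopT rr way h cs (rem+1) o = (rr, false) := by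
        simp [ableLoopT, hcond]
      rw [hstep]
      constructor
      · simp
        exact ⟨o, le_rfl, by push_cast; omega, hh⟩
      · intro hfalse; simp at hfalse

-- specification of the uphill placement loop (cells cs-o … cs-(o+rem-1), read downward)
lemma ableF_spec (way : List Int) (h cs : Int) :
    ∀ (rem : Nat) (o : Int) (rr : List Bool),
      0 ≤ cs - (o + rem) + 1 → cs - o < (rr.length : Int) →
      ((ableLoopF rr way h cs rem o).2 = true ↔
        (∀ j : Int, o ≤ j → j < o + rem →
          pvGetI way (cs - j) = h ∧ pvGetB rr (cs - j) = false)) ∧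
      ((ableLoopF rr way h cs rem o).2 = true →
        (ableLoopF rr way h cs rem o).1.length = rr.length ∧
        ∀ t : Int, 0 ≤ t → pvGetB (ableLoopF rr way h cs rem o).1 t =
          (pvGetB rr t || decide (cs - (o + rem) + 1 ≤ t ∧ t ≤ cs - o))) := by
  intro rem
  induction rem with
  | zero =>
    intro o rr hlo hhi
    constructor
    · simp [ableLoopF]; intro j hj hj'; omega
    · intro _
      refine ⟨rfl, ?_⟩
      intro t ht
      have : ¬ (cs - (o + (0:Nat)) + 1 ≤ t ∧ t ≤ cs - o) := by push_cast; omega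
      simp [ableLoopF, this]
  | succ rem ih =>
    intro o rr hlo hhi
    by_cases hc : pvGetI way (cs - o) = h ∧ pvGetB rr (cs - o) = false
    · have hstep : ableLoopF rr way h cs (rem+1) o
          = ableLoopF (pvSetB rr (cs - o) true) way h cs rem (o+1) := by
        simp [ableLoopF, hc]
      have h0u : (0:Int) ≤ cs - o := by push_cast at hlo; omega
      have hlen' : (pvSetB rr (cs - o) true).length = rr.length := length_pvSetB _ _ _
      have hlo2 : 0 ≤ cs - ((o+1) + (rem:Int)) + 1 := by push_cast at hlo ⊢; omega
      have hhi2 : cs - (o+1) < ((pvSetB rr (cs - o) true).length : Int) := by rw [hlen']; omega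
      have ihs := ih (o+1) (pvSetB rr (cs - o) true) hlo2 hhi2
      have hgets : ∀ j : Int, o + 1 ≤ j →
          pvGetB (pvSetB rr (cs - o) true) (cs - j) = pvGetB rr (cs - j) ∨ cs - j < 0 := by
        intro j hj
        by_cases hneg : cs - j < 0
        · exact Or.inr hneg
        · exact Or.inl (pvGetB_set_ne _ _ _ _ h0u (by omega) (by omega))
      constructor
      · rw [hstep, ihs.1]
        constructor
        · intro hall j hj hj'
          rcases eq_or_lt_of_le hj with rfl | hjo
          · exact hc
          · have hjr : (0:Int) ≤ cs - j := by push_cast at hlo hj' ⊢; omega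
            have := hall j (by omega) (by push_cast at hj' ⊢; omega)
            refine ⟨this.1, ?_⟩
            rw [← pvGetB_set_ne rr (cs - o) (cs - j) true h0u hjr (by omega)]
            exact this.2
        · intro hall j hj hj'
          have hjr : (0:Int) ≤ cs - j := by push_cast at hlo hj' ⊢; omega
          have := hall j (by omega) (by push_cast at hj' ⊢; omega)
          refine ⟨this.1, ?_⟩
          rw [pvGetB_set_ne rr (cs - o) (cs - j) true h0u hjr (by omega)]
          exact this.2
      · rw [hstep]
        intro hok
        have := ihs.2 hok
        refine ⟨this.1.trans hlen', ?_⟩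
        intro t ht
        rw [this.2 t ht]
        by_cases htu : t = cs - o
        · subst htu
          rw [pvGetB_set_self rr (cs - o) true h0u hhi]
          simp only [Bool.true_or]
          symm
          rw [Bool.or_eq_true]
          right
          rw [decide_eq_true_eq]
          push_cast
          omega
        · rw [pvGetB_set_ne rr (cs - o) t true h0u ht htu]
          congr 1
          rw [decide_eq_decide]
          push_cast
          omega
    · have hstep : ableLoopF rr way h cs (rem+1) o = (rr, false) := by
        simp only [ableLoopF]
        rw [if_neg hc]
      rw [hstep]
      constructor
      · simp only [Bool.false_eq_true, false_iff]
        intro hall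
        exact hc (hall o le_rfl (by push_cast; omega))
      · intro hfalse; simp at hfalse

-- B's loop returns false if the debt cannot be repaid within the remaining road
lemma Bfail (way : List Int) (L : Int) :
    ∀ (k : Nat) (p r : Int), 0 ≤ L → r + k ≤ -1 → altLoop way L k p r = false := by
  intro k
  induction k with
  | zero => intro p r hL hr; simp [altLoop]; omega
  | succ k ih =>
    intro p r hL hr
    simp only [altLoop]
    split_ifs with h1 h2 h3 h4
    · exact ih (p+1) (r+1) hL (by push_cast at hr ⊢; omega)
    · rfl
    · omega
    · rfl
    · omega
    · rfl

-- B's loop returns false if, while in debt, a boundary arrives before the debt is repaid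
lemma Bstuck (way : List Int) (L : Int) :
    ∀ (m k : Nat) (p r : Int), m < k → 0 ≤ L → r + m ≤ -1 →
      (∀ t : Nat, t < m → pvGetI way (p + t) = pvGetI way (p + t + 1)) →
      pvGetI way (p + m) ≠ pvGetI way (p + m + 1) →
      altLoop way L k p r = false := by
  intro m
  induction m with
  | zero =>
    intro k p r hk hL hr heq hbad
    obtain ⟨k', rfl⟩ : ∃ k', k = k' + 1 := ⟨k - 1, by omega⟩
    simp only [Nat.cast_zero, add_zero] at hbad
    simp only [altLoop]
    split_ifs with h1 h2 h3 h4
    · exact absurd h1 hbad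
    · rfl
    · omega
    · rfl
    · omega
    · rfl
  | succ m ih =>
    intro k p r hk hL hr heq hbad
    obtain ⟨k', rfl⟩ : ∃ k', k = k' + 1 := ⟨k - 1, by omega⟩
    have h0 : pvGetI way p = pvGetI way (p + 1) := by
      have := heq 0 (by omega)
      simpa using this
    simp only [altLoop, h0, if_pos]
    exact ih k' (p+1) (r+1) (by omega) hL (by push_cast at hr ⊢; omega)
      (by intro t ht
          have hthis := heq (t+1) (by omega)
          have e1 : p + ((t:Nat)+1:Nat) = p + 1 + (t:Int) := by push_cast; ring
          rw [e1] at hthis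
          exact hthis)
      (by have e1 : p + ((m:Nat)+1:Nat) = p + 1 + (m:Int) := by push_cast; ring
          rw [e1] at hbad
          exact hbad)

-- main loop invariant: A's marked array and B's run counter describe the same state
lemma mainLoop (way : List Int) (ms L : Int) :
    ∀ (k : Nat) (i run s : Int) (d : Bool) (rr : List Bool),
      i + k = ms - 1 →
      (rr.length : Int) = ms →
      0 ≤ s → s ≤ i →
      (∀ t : Int, s ≤ t → t ≤ i → pvGetI way t = pvGetI way s) →
      (s = 0 ∨ pvGetI way (s-1) ≠ pvGetI way s) →
      run = i - s + 1 - (if d then L else 0) →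
      (d = true → (∀ t : Int, s ≤ t → t ≤ s + L - 1 → pvGetI way t = pvGetI way s) ∧ s + L - 1 ≤ ms - 1) →
      (∀ t : Int, s ≤ t → (pvGetB rr t = true ↔ (d = true ∧ t ≤ s + L - 1))) →
      putLoop way ms L rr k i = altLoop way L k i run := by
  intro k
  induction k with
  | zero =>
    intro i run s d rr hik hlen hs0 hsi hflat hbd hrun hd hmk
    have : 0 ≤ run := by
      cases d with
      | false => simp at hrun; omega
      | true =>
        have := (hd rfl).2
        simp at hrun; omega
    simp [putLoop, altLoop, this]
  | succ k ih =>
    intro i run s d rr hik hlen hs0 hsi hflat hbd hrun hd hmk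
    have hims : i ≤ ms - 2 := by push_cast at hik; omega
    have ha : pvGetI way i = pvGetI way s := hflat i hsi le_rfl
    -- if d and a boundary occurs at i, the validated stretch is already fully inside [s, i]
    have hkey : d = true → pvGetI way i ≠ pvGetI way (i+1) → i ≥ s + L - 1 := by
      intro hdt hne
      by_contra hlt
      have h1 : pvGetI way (i+1) = pvGetI way s := (hd hdt).1 (i+1) (by omega) (by omega)
      exact hne (by rw [ha, h1])
    by_cases hab : pvGetI way i = pvGetI way (i+1)
    · -- equal step
      rw [show putLoop way ms L rr (k+1) i = putLoop way ms L rr k (i+1) from by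
            simp only [putLoop]; rw [if_pos hab],
          show altLoop way L (k+1) i run = altLoop way L k (i+1) (run+1) from by
            simp only [altLoop]; rw [if_pos hab]]
      exact ih (i+1) (run+1) s d rr (by push_cast at hik ⊢; omega) hlen hs0 (by omega)
        (by intro t hts hti
            rcases eq_or_lt_of_le hti with rfl | h
            · rw [← hab]; exact ha
            · exact hflat t hts (by omega))
        hbd (by cases d <;> simp at hrun ⊢ <;> omega) hd hmk
    · by_cases hup : pvGetI way i + 1 = pvGetI way (i+1)
      · -- ascent
        have hup' : pvGetI way (i+1) = pvGetI way i + 1 := hup.symm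
        have hAstep : putLoop way ms L rr (k+1) i =
            (if (able_putting_runway rr false (pvGetI way i) i way ms L).2 then
              putLoop way ms L (able_putting_runway rr false (pvGetI way i) i way ms L).1 k (i+1)
            else false) := by
          simp only [putLoop]; rw [if_neg hab, if_pos hup]
        have hiff : (0 ≤ i - L + 1 ∧
            ∀ j : Int, 0 ≤ j → j < (L.toNat : Int) →
              pvGetI way (i - j) = pvGetI way i ∧ pvGetB rr (i - j) = false) ↔ L ≤ run := by
          constructor
          · rintro ⟨hg, hok⟩
            by_cases hL : L ≤ 0
            · cases d with
              | false => simp at hrun; omega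
              | true => have := hkey rfl hab; simp at hrun; omega
            · push_neg at hL
              have htn : (L.toNat : Int) = L := by omega
              have hsle : s ≤ i - L + 1 := by
                by_contra hcon
                push_neg at hcon
                rcases hbd with rfl | hne
                · omega
                · have hj := hok (i - s + 1) (by omega) (by omega)
                  have hj1 := hj.1
                  have e : i - (i - s + 1) = s - 1 := by ring
                  rw [e, ha] at hj1
                  exact hne hj1
              cases d with
              | false => simp at hrun; omega
              | true =>
                have hj := hok (L - 1) (by omega) (by omega)
                have h2 := hj.2
                have h4 : ¬ (i - (L-1) ≤ s + L - 1) := by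
                  intro hc
                  have := (hmk (i - (L-1)) (by omega)).mpr ⟨rfl, hc⟩
                  rw [this] at h2
                  simp at h2
                simp at hrun
                omega
          · intro hr
            by_cases hL : L ≤ 0
            · constructor
              · omega
              · intro j hj hj'; omega
            · push_neg at hL
              have htn : (L.toNat : Int) = L := by omega
              have hge : s ≤ i - L + 1 := by
                cases d with
                | false => simp at hrun; omega
                | true => simp at hrun; omega
              refine ⟨by omega, ?_⟩
              intro j hj hj'
              have hts : s ≤ i - j := by
                cases d with
                | false => simp at hrun; omega
                | true => simp at hrun; omega
              refine ⟨by rw [hflat (i - j) hts (by omega), ha], ?_⟩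
              rw [← Bool.not_eq_true]
              rw [hmk (i - j) hts]
              rintro ⟨hdt, hle⟩
              cases d with
              | false => exact absurd hdt (by simp)
              | true => simp at hrun; omega
        by_cases hrL : run < L
        · -- both fail
          have hnot : ¬ (0 ≤ i - L + 1 ∧
              ∀ j : Int, 0 ≤ j → j < (L.toNat : Int) →
                pvGetI way (i - j) = pvGetI way i ∧ pvGetB rr (i - j) = false) := by
            rw [hiff]; omega
          have hfail : (able_putting_runway rr false (pvGetI way i) i way ms L).2 = false := by
            by_cases hg : i - L + 1 < 0
            · simp [able_putting_runway, hg]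
            · push_neg at hg
              have heq2 : able_putting_runway rr false (pvGetI way i) i way ms L
                  = ableLoopF rr way (pvGetI way i) i L.toNat 0 := by
                simp [able_putting_runway, not_lt.mpr hg]
              rw [heq2, ← Bool.not_eq_true,
                (ableF_spec way (pvGetI way i) i L.toNat 0 rr (by push_cast; omega) (by omega)).1]
              intro hall
              exact hnot ⟨by omega, fun j hj hj' => hall j hj (by push_cast at hj' ⊢; omega)⟩
          rw [hAstep, hfail]
          rw [if_neg (Bool.false_ne_true)]
          rw [show altLoop way L (k+1) i run = false from by
            simp only [altLoop]; rw [if_neg hab, if_pos hup', if_pos hrL]]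
        · -- both succeed and continue
          push_neg at hrL
          have hcond := hiff.mpr hrL
          have hg : ¬ (i - L + 1 < 0) := by omega
          have heq2 : able_putting_runway rr false (pvGetI way i) i way ms L
              = ableLoopF rr way (pvGetI way i) i L.toNat 0 := by
            simp [able_putting_runway, hg]
          have hspec := ableF_spec way (pvGetI way i) i L.toNat 0 rr
            (by push_cast; omega) (by omega)
          have hok : (ableLoopF rr way (pvGetI way i) i L.toNat 0).2 = true := by
            rw [hspec.1]
            intro j hj hj'
            exact hcond.2 j hj (by push_cast at hj' ⊢; omega)
          have hres := hspec.2 hok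
          rw [hAstep, heq2, hok, if_pos rfl]
          rw [show altLoop way L (k+1) i run = altLoop way L k (i+1) 1 from by
            simp only [altLoop]; rw [if_neg hab, if_pos hup', if_neg (not_lt.mpr hrL)]]
          apply ih (i+1) 1 (i+1) false _ (by push_cast at hik ⊢; omega)
            (by rw [hres.1]; exact hlen) (by omega) le_rfl
            (by intro t h1 h2
                have ht : t = i + 1 := by omega
                rw [ht])
            (by right; simpa using hab)
            (by simp)
            (by intro h; exact absurd h (by simp))
            (by intro t hti
                have ht0 : (0:Int) ≤ t := by omega
                rw [hres.2 t ht0]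
                have hnm : pvGetB rr t = false := by
                  rw [← Bool.not_eq_true, hmk t (by omega)]
                  rintro ⟨hdt, hle⟩
                  have := hkey hdt hab
                  omega
                have hno : ¬ (i - (0 + (L.toNat:Int)) + 1 ≤ t ∧ t ≤ i - 0) := by omega
                simp [hnm, hno]
                omega)
      · by_cases hdn : pvGetI way i - 1 = pvGetI way (i+1)
        · -- descent
          have hdn' : pvGetI way (i+1) = pvGetI way i - 1 := hdn.symm
          have hup' : ¬ pvGetI way (i+1) = pvGetI way i + 1 := fun h => hup h.symm
          have hrn : ¬ (run < 0) := by
            cases d with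
            | false => simp at hrun; omega
            | true => have := hkey rfl hab; simp at hrun; omega
          have hAstep : putLoop way ms L rr (k+1) i =
              (if (able_putting_runway rr true (pvGetI way i) i way ms L).2 then
                putLoop way ms L (able_putting_runway rr true (pvGetI way i) i way ms L).1 k (i+1)
              else false) := by
            simp only [putLoop]; rw [if_neg hab, if_neg hup, if_pos hdn]
          have hBstep : altLoop way L (k+1) i run = altLoop way L k (i+1) (1 - L) := by
            simp only [altLoop]
            rw [if_neg hab, if_neg hup', if_pos hdn', if_neg hrn]
          have hnomark : ∀ j : Int, 0 ≤ j → pvGetB rr (i + j + 1) = false := by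
            intro j hj
            rw [← Bool.not_eq_true, hmk (i + j + 1) (by omega)]
            rintro ⟨hdt, hle⟩
            have := hkey hdt hab
            omega
          by_cases hguard : i + L > ms - 1
          · -- A fails on the bound; B carries unpayable debt
            have hfail : able_putting_runway rr true (pvGetI way i) i way ms L = (rr, false) := by
              simp [able_putting_runway, hguard]
            rw [hAstep, hfail, hBstep]
            rw [if_neg (Bool.false_ne_true)]
            exact (Bfail way L k (i+1) (1-L) (by omega) (by push_cast at hik; omega)).symm
          · push_neg at hguard
            have heq2 : able_putting_runway rr true (pvGetI way i) i way ms L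
                = ableLoopT rr way (pvGetI way i) i L.toNat 0 := by
              simp [able_putting_runway, not_lt.mpr hguard]
            have hspec := ableT_spec way (pvGetI way i) i L.toNat 0 rr
              (by intro j hj; exact hnomark j hj) (by omega)
              (by rw [hlen]; push_cast; omega)
            by_cases hok : (ableLoopT rr way (pvGetI way i) i L.toNat 0).2 = true
            · -- both succeed and continue
              have hres := hspec.2 hok
              have hall := hspec.1.mp hok
              rw [hAstep, heq2, hok, if_pos rfl, hBstep]
              apply ih (i+1) (1-L) (i+1) true _ (by push_cast at hik ⊢; omega)
                (by rw [hres.1]; exact hlen) (by omega) le_rfl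
                (by intro t h1 h2
                    have ht : t = i + 1 := by omega
                    rw [ht])
                (by right; simpa using hab)
                (by simp)
                (by intro _
                    constructor
                    · intro t h1 h2
                      rcases eq_or_lt_of_le h1 with rfl | h
                      · rfl
                      · have hthis := hall (t - i - 1) (by omega) (by push_cast at h2 ⊢; omega)
                        have e : i + (t - i - 1) + 1 = t := by ring
                        rw [e] at hthis
                        rw [hthis, ← hdn]
                    · omega)
                (by intro t hti
                    have ht0 : (0:Int) ≤ t := by omega
                    rw [hres.2 t ht0]
                    have hnm : pvGetB rr t = false := by
                      rw [← Bool.not_eq_true, hmk t (by omega)]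
                      rintro ⟨hdt, hle⟩
                      have := hkey hdt hab
                      omega
                    rw [hnm]
                    simp only [Bool.false_or, true_and, decide_eq_true_eq]
                    push_cast
                    omega)
            · -- A fails on a cell; B hits the bad boundary while still in debt
              rw [Bool.not_eq_true] at hok
              rw [hAstep, heq2, hok, if_neg (Bool.false_ne_true), hBstep]
              have hbadx : ∃ n : Nat, (n:Int) < (L.toNat:Int) ∧
                  pvGetI way (i + n + 1) ≠ pvGetI way i - 1 := by
                have hnall := hspec.1.not.mp (by rw [hok]; simp)
                push_neg at hnall
                obtain ⟨j, hj0, hjL, hjne⟩ := hnall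
                refine ⟨j.toNat, by omega, ?_⟩
                have e : i + ((j.toNat:Int)) + 1 = i + j + 1 := by omega
                rw [e]
                exact hjne
              have hL1 : 1 ≤ L := by
                by_contra hc
                obtain ⟨n, hn, -⟩ := hbadx
                omega
              have hex : ∃ n : Nat, pvGetI way (i + 1 + n) ≠ pvGetI way i - 1 := by
                obtain ⟨n, hn1, hn2⟩ := hbadx
                refine ⟨n, ?_⟩
                rw [show (i + 1 + (n:Int)) = i + n + 1 by ring]
                exact hn2
              have hPj0 : pvGetI way (i + 1 + ((Nat.find hex : Nat):Int)) ≠ pvGetI way i - 1 :=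
                Nat.find_spec hex
              have hmin : ∀ m : Nat, m < Nat.find hex →
                  pvGetI way (i + 1 + (m:Int)) = pvGetI way i - 1 := by
                intro m hm
                have := Nat.find_min hex hm
                simpa using this
              have hj0pos : 1 ≤ Nat.find hex := by
                rcases Nat.eq_zero_or_pos (Nat.find hex) with h0 | h1
                · exfalso
                  apply hPj0
                  rw [h0]
                  simpa using hdn'
                · exact h1
              have hj0L : ((Nat.find hex : Nat):Int) < L := by
                obtain ⟨n, hn1, hn2⟩ := hbadx
                have : Nat.find hex ≤ n := Nat.find_min' hex
                  (by rw [show (i + 1 + (n:Int)) = i + n + 1 by ring]; exact hn2)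
                omega
              have hj0k : Nat.find hex - 1 < k := by
                push_cast at hik
                omega
              symm
              apply Bstuck way L (Nat.find hex - 1) k (i+1) (1-L) hj0k (by omega)
                (by push_cast; omega)
                (by intro t ht
                    have e1 := hmin t (by omega)
                    have e2 := hmin (t+1) (by omega)
                    push_cast at e1 e2 ⊢
                    rw [show i + 1 + (t:Int) + 1 = i + 1 + ((t:Int) + 1) by ring]
                    rw [e1, e2])
                (by have e1 := hmin (Nat.find hex - 1) (by omega)
                    have ec : ((Nat.find hex - 1 : Nat) : Int) = ((Nat.find hex : Nat):Int) - 1 := by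
                      omega
                    rw [ec] at e1 ⊢
                    rw [show i + 1 + (((Nat.find hex : Nat):Int) - 1) + 1
                        = i + 1 + ((Nat.find hex : Nat):Int) by ring]
                    rw [e1]
                    exact fun hcc => hPj0 hcc.symm)
        · -- big step: both fail
          have hup' : ¬ pvGetI way (i+1) = pvGetI way i + 1 := fun h => hup h.symm
          have hdn' : ¬ pvGetI way (i+1) = pvGetI way i - 1 := fun h => hdn h.symm
          rw [show putLoop way ms L rr (k+1) i = false from by
            simp only [putLoop]; rw [if_neg hab, if_neg hup, if_neg hdn]]
          rw [show altLoop way L (k+1) i run = false from by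
            simp only [altLoop]; rw [if_neg hab, if_neg hup', if_neg hdn']]

-- the two ports agree on every input
lemma ports_eq (way : List Int) (ms L : Int) :
    put_runway way ms L = put_runway_alt way ms L := by
  unfold put_runway put_runway_alt
  by_cases hms : 1 ≤ ms
  · apply mainLoop way ms L (ms - 1).toNat 0 1 0 false
    · omega
    · simp; omega
    · exact le_rfl
    · exact le_rfl
    · intro t h1 h2
      have ht : t = 0 := by omega
      rw [ht]
    · left; rfl
    · simp
    · intro h; exact absurd h (by simp)
    · intro t ht
      constructor
      · intro hh
        exfalso
        rw [pvGetB_eq _ _ ht] at hh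
        rcases Nat.lt_or_ge t.toNat ms.toNat with hlt | hge
        · simp [List.getElem?_replicate, hlt] at hh
        · rw [List.getElem?_eq_none (by simpa using hge)] at hh
          simp at hh
      · rintro ⟨h, -⟩
        exact absurd h (by simp)
  · have h0 : (ms - 1).toNat = 0 := by omega
    rw [h0]
    simp [putLoop, altLoop]

-- ===== VERDICT (by name: the statement is the Claim_ definition above) =====
theorem put_runway_spec : Claim_equal_put_runway := by
  intro way ms L _ _
  unfold Spec_put_runway
  exact ports_eq way ms L
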